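-- pv_equiv track=rewrite | github.com/d00m4ace/AISPUTNICK | doc_sync/providers/google_drive_list.py | extract_folder_id
-- ===== SOURCE A (Python) =====
-- def extract_folder_id(url: str) -> str:
--     """Извлечь ID папки из URL"""
--     if 'drive.google.com' in url:
--         parts = url.split('/')
--         for i, part in enumerate(parts):
--             if part == 'folders' and i + 1 < len(parts):
--                 folder_id = parts[i + 1].split('?')[0]
--                 return folder_id
--     return url
-- ===== SOURCE B (Python) =====
-- def extract_folder_id(url: str) -> str:
--     """Извлечь ID папки из URL"""
--     if 'drive.google.com' in url:
--         at_seg_start = True  # at index 0 or just after a '/'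
--         n = len(url)
--         for i in range(n):
--             if at_seg_start and url.startswith('folders/', i):
--                 j = i + 8
--                 k = j
--                 while k < n and url[k] != '/' and url[k] != '?':
--                     k += 1
--                 return url[j:k]
--             at_seg_start = url[i] == '/'
--     return url
-- ===== Notes on version B (the rewrite author's own statement) =====
-- stated objective: alternative
-- what changed: B replaces A's split-into-parts-then-enumerate search with a single left-to-right character scan that matches the folder marker at segment starts and copies the id up to the next separator or query character, allocating no parts list.
import Mathlib
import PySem

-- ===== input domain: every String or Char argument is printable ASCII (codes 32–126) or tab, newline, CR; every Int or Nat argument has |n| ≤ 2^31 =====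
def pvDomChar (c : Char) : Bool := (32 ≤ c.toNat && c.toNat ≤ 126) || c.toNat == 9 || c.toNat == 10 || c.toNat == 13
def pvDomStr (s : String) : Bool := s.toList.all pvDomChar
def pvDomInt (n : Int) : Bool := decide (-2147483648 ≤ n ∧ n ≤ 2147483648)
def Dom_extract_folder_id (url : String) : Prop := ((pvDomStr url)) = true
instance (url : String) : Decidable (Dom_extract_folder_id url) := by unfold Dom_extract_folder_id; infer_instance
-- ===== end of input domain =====

-- B replaces A's split-into-parts-then-enumerate search by a single character scan
-- (match 'folders/' at segment starts, copy the id until '/' or '?'); same cost, no parts list.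

-- ===== PORT A =====
-- parts[i+1].split('?')[0] : the [0] of a split result (split never returns an empty list,
-- so the [] arm is unreachable and Python never raises here)
def pvSplitQHead (p : List Char) : List Char :=
  match PySem.Chars.splitOn p ['?'] with
  | q :: _ => q
  | [] => []

-- 'for i, part in enumerate(parts): if part == "folders" and i + 1 < len(parts): return …'
def pvALoop (parts : List (List Char)) : List (Int × List Char) → Option (List Char)
  | [] => none
  | (i, part) :: rest =>
    if part = "folders".toList ∧ i + 1 < (parts.length : Int) then
      some (pvSplitQHead (PySem.List.pyGetD parts (i + 1) []))
    else pvALoop parts rest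

def extract_folder_id (url : String) : String :=
  if PySem.Str.isIn "drive.google.com" url then
    let parts := PySem.Chars.splitOn url.toList ['/']
    match pvALoop parts (PySem.List.enumerate parts 0) with
    | some fid => String.ofList fid
    | none => url
  else url

-- ===== PORT B =====
-- the inner while loop 'while k < n and url[k] != "/" and url[k] != "?": k += 1' plus 'url[j:k]'
def pvCapture : List Char → List Char
  | [] => []
  | c :: rest => if c = '/' ∨ c = '?' then [] else c :: pvCapture rest

-- the for-loop over indices carrying the at_seg_start flag; url.startswith('folders/', i)
def pvScan : List Char → Bool → Option (List Char)
  | [], _ => none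
  | c :: rest, atStart =>
    if atStart ∧ "folders/".toList.isPrefixOf (c :: rest) then
      some (pvCapture (List.drop 8 (c :: rest)))
    else pvScan rest (c = '/')

def extract_folder_id_alt (url : String) : String :=
  if PySem.Str.isIn "drive.google.com" url then
    match pvScan url.toList true with
    | some fid => String.ofList fid
    | none => url
  else url

-- ===== PRECONDITION & SPEC =====
def Spec_extract_folder_id (url : String) (out : String) : Prop := out = extract_folder_id_alt url
instance (url : String) (out : String) : Decidable (Spec_extract_folder_id url out) := by unfold Spec_extract_folder_id; infer_instance

-- ===== CLAIM (what is proved, stated in full; the proofs are below) =====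
def Claim_equal_extract_folder_id : Prop := ∀ (url : String), Dom_extract_folder_id url → Spec_extract_folder_id url (extract_folder_id url)

-- ===== LEMMAS AND PROOFS =====

-- A simple structural model of str.split(sep) for a one-character separator.
def pvSplitFrom (sep : Char) : List Char → List Char → List (List Char)
  | cur, [] => [cur.reverse]
  | cur, c :: r => if c = sep then cur.reverse :: pvSplitFrom sep [] r else pvSplitFrom sep (c :: cur) r

def pvSplitC (sep : Char) (l : List Char) : List (List Char) := pvSplitFrom sep [] l

-- the common shape both searches reduce to: first 'folders' segment with a successor
def pvLoopA : List (List Char) → Option (List Char)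
  | [] => none
  | [_] => none
  | p :: q :: rest =>
    if p = "folders".toList then some (q.takeWhile (· ≠ '?')) else pvLoopA (q :: rest)

theorem pvGo_spec (sep : Char) : ∀ (fuel : Nat) (l cur : List Char) (acc : List (List Char)),
    l.length ≤ fuel →
    PySem.Chars.splitOn.go [sep] fuel l cur acc = acc.reverse ++ pvSplitFrom sep cur l := by
  intro fuel
  induction fuel with
  | zero =>
    intro l cur acc h
    have : l = [] := List.eq_nil_of_length_eq_zero (Nat.le_zero.mp h)
    subst this
    simp [PySem.Chars.splitOn.go, pvSplitFrom]
  | succ n ih =>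
    intro l cur acc h
    cases l with
    | nil => simp [PySem.Chars.splitOn.go, pvSplitFrom]
    | cons c rest =>
      simp only [PySem.Chars.splitOn.go]
      by_cases hc : c = sep
      · subst hc
        have hpre : List.isPrefixOf [c] (c :: rest) = true := by
          simp [List.isPrefixOf]
        simp only [hpre, if_true]
        rw [ih _ _ _ (by simpa using Nat.le_of_succ_le_succ h)]
        simp [pvSplitFrom]
      · have hpre : List.isPrefixOf [sep] (c :: rest) = false := by
          simp [List.isPrefixOf]
          intro hh
          exact absurd hh.symm hc
        simp only [hpre, Bool.false_eq_true, if_false]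
        rw [ih _ _ _ (by simpa using Nat.le_of_succ_le_succ h)]
        simp [pvSplitFrom, hc]

theorem pvSplitOn_eq (sep : Char) (l : List Char) :
    PySem.Chars.splitOn l [sep] = pvSplitC sep l := by
  unfold PySem.Chars.splitOn pvSplitC
  rw [pvGo_spec sep (l.length + 1) l [] [] (by omega)]
  simp

theorem pvSplitFrom_eq (sep : Char) : ∀ (l cur : List Char),
    pvSplitFrom sep cur l = (cur.reverse ++ (pvSplitC sep l).headD []) :: (pvSplitC sep l).tail := by
  intro l
  induction l with
  | nil => intro cur; simp [pvSplitFrom, pvSplitC]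
  | cons c r ih =>
    intro cur
    by_cases hc : c = sep
    · subst hc
      simp [pvSplitFrom, pvSplitC]
    · show pvSplitFrom sep cur (c :: r) = _
      rw [pvSplitFrom, if_neg hc]
      rw [ih (c :: cur)]
      have hl : pvSplitC sep (c :: r)
          = (c :: ((pvSplitC sep r).headD [])) :: (pvSplitC sep r).tail := by
        unfold pvSplitC
        rw [pvSplitFrom, if_neg hc, ih [c]]
        simp [pvSplitC]
      rw [hl]
      simp [pvSplitC]

theorem pvSplitC_head (sep : Char) (l : List Char) :
    (pvSplitC sep l).headD [] = l.takeWhile (· ≠ sep) := by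
  induction l with
  | nil => simp [pvSplitC, pvSplitFrom]
  | cons c r ih =>
    by_cases hc : c = sep
    · subst hc; simp [pvSplitC, pvSplitFrom, List.takeWhile]
    · unfold pvSplitC
      rw [pvSplitFrom, if_neg hc, pvSplitFrom_eq]
      simp only [ne_eq, decide_not] at ih
      simp [List.takeWhile, hc]
      simpa [List.headD_eq_head?_getD] using ih

theorem pvSplitC_eq_cons (sep : Char) (l : List Char) :
    pvSplitC sep l = l.takeWhile (· ≠ sep) :: (pvSplitC sep l).tail := by
  conv_lhs => rw [show pvSplitC sep l = pvSplitFrom sep [] l from rfl, pvSplitFrom_eq]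
  rw [pvSplitC_head]
  simp

theorem pvSplitC_tail_nil_iff (sep : Char) (l : List Char) :
    (pvSplitC sep l).tail = [] ↔ sep ∉ l := by
  induction l with
  | nil => simp [pvSplitC, pvSplitFrom]
  | cons c r ih =>
    by_cases hc : c = sep
    · subst hc
      have h1 : (pvSplitC c (c :: r)).tail = pvSplitC c r := by
        simp [pvSplitC, pvSplitFrom]
      have hne : pvSplitC c r ≠ [] := by rw [pvSplitC_eq_cons c r]; simp
      simp [h1, hne]
    · have hl : pvSplitC sep (c :: r)
          = (c :: ((pvSplitC sep r).headD [])) :: (pvSplitC sep r).tail := by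
        unfold pvSplitC
        rw [pvSplitFrom, if_neg hc, pvSplitFrom_eq]
        simp [pvSplitC]
      rw [hl]
      simp only [List.tail_cons, ih, List.mem_cons, not_or]
      constructor
      · intro h; exact ⟨fun h1 => hc h1.symm, h⟩
      · exact fun h => h.2

theorem pvSplitFrom_seg_append (sep : Char) : ∀ (seg r cur : List Char), sep ∉ seg →
    pvSplitFrom sep cur (seg ++ sep :: r) = (cur.reverse ++ seg) :: pvSplitC sep r := by
  intro seg
  induction seg with
  | nil => intro r cur _; simp [pvSplitFrom, pvSplitC]
  | cons c s ih =>
    intro r cur h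
    have hc : c ≠ sep := fun hh => h (by simp [hh])
    show pvSplitFrom sep cur ((c :: s) ++ sep :: r) = _
    rw [List.cons_append, pvSplitFrom, if_neg hc, ih r (c :: cur) (fun hh => h (List.mem_cons_of_mem _ hh))]
    simp

theorem pvSplitC_seg_append (sep : Char) : ∀ (seg r : List Char), sep ∉ seg →
    pvSplitC sep (seg ++ sep :: r) = seg :: pvSplitC sep r := by
  intro seg r h
  unfold pvSplitC
  rw [pvSplitFrom_seg_append sep seg r [] h]
  simp
  rfl

theorem pvCapture_eq (r : List Char) :
    pvCapture r = (r.takeWhile (· ≠ '/')).takeWhile (· ≠ '?') := by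
  induction r with
  | nil => simp [pvCapture]
  | cons c t ih =>
    by_cases h1 : c = '/'
    · subst h1; simp [pvCapture, List.takeWhile]
    · by_cases h2 : c = '?'
      · subst h2; simp [pvCapture, List.takeWhile]
      · rw [pvCapture, if_neg (by tauto)]
        simp [List.takeWhile, h1, h2, ih]

theorem pvSplitQHead_eq (p : List Char) : pvSplitQHead p = p.takeWhile (· ≠ '?') := by
  unfold pvSplitQHead
  rw [pvSplitOn_eq, pvSplitC_eq_cons]

theorem pvScan_spec : ∀ (n : Nat) (l : List Char), l.length ≤ n →
    pvScan l true = pvLoopA (pvSplitC '/' l) ∧ pvScan l false = pvLoopA ((pvSplitC '/' l).tail) := by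
  intro n
  induction n with
  | zero =>
    intro l h
    have : l = [] := List.eq_nil_of_length_eq_zero (Nat.le_zero.mp h)
    subst this
    simp [pvScan, pvSplitC, pvSplitFrom, pvLoopA]
  | succ m ih =>
    intro l h
    cases l with
    | nil => simp [pvScan, pvSplitC, pvSplitFrom, pvLoopA]
    | cons c rest =>
      have hlen : rest.length ≤ m := by simpa using Nat.le_of_succ_le_succ h
      constructor
      · -- atStart = true
        by_cases hp : List.isPrefixOf "folders/".toList (c :: rest) = true
        · -- the segment here is exactly 'folders' with a successor
          have hform : c :: rest = "folders".toList ++ '/' :: (c :: rest).drop 8 := by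
            rcases List.isPrefixOf_iff_prefix.mp hp with ⟨t, ht⟩
            rw [← ht]
            simp
          rw [pvScan, if_pos ⟨rfl, hp⟩]
          conv_rhs => rw [hform]
          rw [show ("folders".toList ++ '/' :: (c :: rest).drop 8)
                = "folders".toList ++ '/' :: List.drop 8 (c :: rest) from rfl]
          rw [pvSplitC_seg_append '/' "folders".toList _ (by decide)]
          rw [pvSplitC_eq_cons '/' (List.drop 8 (c :: rest))]
          rw [pvLoopA, if_pos rfl]
          rw [pvCapture_eq]
        · rw [pvScan, if_neg (fun hcon => hp hcon.2)]
          by_cases hc : c = '/'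
          · subst hc
            have h1 : pvSplitC '/' ('/' :: rest) = [] :: pvSplitC '/' rest := by
              simp [pvSplitC, pvSplitFrom]
            rw [h1, pvSplitC_eq_cons '/' rest, pvLoopA, if_neg (by decide),
               ← pvSplitC_eq_cons '/' rest]
            simpa using (ih rest hlen).1
          · have hl : pvSplitC '/' (c :: rest)
                = (c :: ((pvSplitC '/' rest).headD [])) :: (pvSplitC '/' rest).tail := by
              unfold pvSplitC
              rw [pvSplitFrom, if_neg hc, pvSplitFrom_eq]
              simp [pvSplitC]
            rw [hl]
            have h2 := (ih rest hlen).2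
            rcases htl : (pvSplitC '/' rest).tail with _ | ⟨y, t⟩
            · rw [htl] at h2
              simpa [pvLoopA, hc] using h2
            · have hmem : '/' ∈ rest := by
                by_contra hnm
                have := (pvSplitC_tail_nil_iff '/' rest).mpr hnm
                rw [htl] at this
                simp at this
              have hne : (c :: (pvSplitC '/' rest).headD []) ≠ "folders".toList := by
                intro he
                apply hp
                rw [pvSplitC_head] at he
                have hdw : rest.takeWhile (· ≠ '/') ++ rest.dropWhile (· ≠ '/') = rest :=
                  List.takeWhile_append_dropWhile
                have hdne : rest.dropWhile (· ≠ '/') ≠ [] := by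
                  intro hnil
                  rw [hnil, List.append_nil] at hdw
                  have := List.mem_takeWhile_imp (l := rest) (p := (· ≠ '/')) (hdw ▸ hmem)
                  simp at this
                rcases hx : rest.dropWhile (· ≠ '/') with _ | ⟨d, t'⟩
                · exact absurd hx hdne
                · have hd : d = '/' := by
                    have := List.head_dropWhile_not (l := rest) (· ≠ '/')
                      (show rest.dropWhile (· ≠ '/') ≠ [] by rw [hx]; simp)
                    simp only [hx] at this
                    simpa using this
                  subst hd
                  apply List.isPrefixOf_iff_prefix.mpr
                  refine ⟨t', ?_⟩
                  have : c :: rest = (c :: rest.takeWhile (· ≠ '/')) ++ '/' :: t' := by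
                    rw [← hx, ← hdw]
                    simp
                  have hfo : ("folders/".toList : List Char) = "folders".toList ++ ['/'] := by
                    decide
                  rw [this, he, hfo]
                  simp
              rw [htl] at h2
              rw [pvLoopA, if_neg hne]
              simpa [hc] using h2
      · -- atStart = false
        rw [pvScan, if_neg (fun hcon => by simpa using hcon.1)]
        by_cases hc : c = '/'
        · subst hc
          have h1 : pvSplitC '/' ('/' :: rest) = [] :: pvSplitC '/' rest := by
            simp [pvSplitC, pvSplitFrom]
          rw [h1]
          simpa using (ih rest hlen).1
        · have hl : pvSplitC '/' (c :: rest)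
              = (c :: ((pvSplitC '/' rest).headD [])) :: (pvSplitC '/' rest).tail := by
            unfold pvSplitC
            rw [pvSplitFrom, if_neg hc, pvSplitFrom_eq]
            simp [pvSplitC]
          rw [hl]
          simpa [hc] using (ih rest hlen).2

theorem pvALoop_spec : ∀ (suf pre parts : List (List Char)), parts = pre ++ suf →
    pvALoop parts (PySem.List.enumerate suf pre.length) = pvLoopA suf := by
  intro suf
  induction suf with
  | nil => intro pre parts hp; simp [PySem.List.enumerate_nil, pvALoop, pvLoopA]
  | cons p ps ih =>
    intro pre parts hp
    rw [PySem.List.enumerate_cons, pvALoop]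
    by_cases hcond : p = "folders".toList ∧ ((pre.length : Int) + 1 < (parts.length : Int))
    · obtain ⟨hpf, hlt⟩ := hcond
      have hlen : parts.length = pre.length + 1 + ps.length := by
        subst hp; simp; omega
      have hps : ps ≠ [] := by
        intro hnil
        subst hnil
        rw [hlen] at hlt
        simp at hlt
      rcases ps with _ | ⟨q, ps'⟩
      · exact absurd rfl hps
      rw [if_pos ⟨hpf, hlt⟩, pvLoopA, if_pos hpf]
      congr 1
      rw [pvSplitQHead_eq]
      congr 1
      have hc1 : ((pre.length : Int) + 1) = ((pre.length + 1 : Nat) : Int) := by push_cast; ring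
      rw [hc1, PySem.List.pyGetD_natCast]
      subst hp
      rw [List.getD_eq_getElem?_getD, List.getElem?_append_right (by omega)]
      simp
    · rw [if_neg hcond]
      have hih := ih (pre ++ [p]) parts (by simp [hp])
      rw [List.length_append] at hih
      have hc1 : (((pre.length + [p].length : Nat)) : Int) = (pre.length : Int) + 1 := by
        push_cast; simp
      rw [hc1] at hih
      rw [hih]
      rcases ps with _ | ⟨q, ps'⟩
      · simp [pvLoopA]
      · have hpne : p ≠ "folders".toList := by
          intro hpf
          apply hcond
          refine ⟨hpf, ?_⟩
          subst hp
          push_cast [List.length_append]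
          simp
        rw [pvLoopA, if_neg hpne]

-- ===== VERDICT (by name: the statement is the Claim_ definition above) =====
theorem extract_folder_id_spec : Claim_equal_extract_folder_id := by
  intro url _
  show extract_folder_id url = extract_folder_id_alt url
  unfold extract_folder_id extract_folder_id_alt
  by_cases h : PySem.Str.isIn "drive.google.com" url = true
  · simp only [h, if_true]
    have ha : pvALoop (PySem.Chars.splitOn url.toList ['/'])
        (PySem.List.enumerate (PySem.Chars.splitOn url.toList ['/']) 0)
        = pvLoopA (pvSplitC '/' url.toList) := by
      rw [pvSplitOn_eq]
      have := pvALoop_spec (pvSplitC '/' url.toList) [] (pvSplitC '/' url.toList) rfl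
      simpa using this
    have hb := (pvScan_spec url.toList.length url.toList le_rfl).1
    rw [ha, hb]
  · simp only [eq_false_of_ne_true h, Bool.false_eq_true, if_false]
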